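-- pv_equiv track=rewrite | github.com/konrad-wila/Python-Scrabble | PartI_Task5.py | canBeMade
-- ===== SOURCE A (Python) =====
-- def canBeMade(word, myTiles):  # noqa: Task defined function name
--     # Author: Konrad Wila
--     # Precondition: word is a string of lowercase letters
--     # Precondition: myTiles is a list of lowercase letters
--     # Postcondition: returns True if word can be made with the tiles
--     # Postcondition: returns False if word cannot be made with the tiles
--     """Checks if the word can be made with the tiles."""
--     function_player_tiles = myTiles.copy()
--     for letter in word:
--         if letter in function_player_tiles:
--             try:
--                 function_player_tiles.remove(letter)
--             except ValueError:
--                 return False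
--         else:
--             return False
--
--     return True
-- ===== SOURCE B (Python) =====
-- def canBeMade(word, myTiles):
--     """Count both sides, then compare the tables (no per-letter remove loop)."""
--     need = {}
--     for ch in word:
--         need[ch] = need.get(ch, 0) + 1
--     have = {}
--     for t in myTiles:
--         have[t] = have.get(t, 0) + 1
--     return all(have.get(c, 0) >= n for c, n in need.items())
-- ===== Notes on version B (the rewrite author's own statement) =====
-- stated objective: faster
-- what changed: Replaced the per-letter membership-test-and-remove loop over a mutable tile copy with two frequency tables (word counts and tile counts) compared in one aggregate pass; B never copies or mutates the tile list.
import Mathlib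
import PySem

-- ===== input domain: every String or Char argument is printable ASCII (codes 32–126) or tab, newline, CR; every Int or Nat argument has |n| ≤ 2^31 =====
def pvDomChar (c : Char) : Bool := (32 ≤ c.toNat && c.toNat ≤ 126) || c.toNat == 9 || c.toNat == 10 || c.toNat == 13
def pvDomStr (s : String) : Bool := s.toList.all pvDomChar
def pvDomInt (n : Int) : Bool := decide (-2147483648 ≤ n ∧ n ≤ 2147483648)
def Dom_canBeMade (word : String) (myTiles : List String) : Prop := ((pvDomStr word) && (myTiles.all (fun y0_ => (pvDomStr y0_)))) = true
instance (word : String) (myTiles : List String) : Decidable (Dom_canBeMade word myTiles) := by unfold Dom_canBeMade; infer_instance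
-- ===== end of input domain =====

-- B replaces A's per-letter membership-test-and-remove loop by two frequency tables compared once; return value only (A also never mutates its argument).

-- ===== PORT A =====
-- the 'for letter in word' loop over the mutable copy of myTiles
def canBeMadeLoop : List Char → List String → Bool
  | [], _ => true
  | c :: rest, tiles =>
    if String.mk [c] ∈ tiles then
      match PySem.List.remove? tiles (String.mk [c]) with
      | some tiles' => canBeMadeLoop rest tiles'
      | none => false          -- the 'except ValueError: return False' branch
    else false

def canBeMade (word : String) (myTiles : List String) : Bool :=
  canBeMadeLoop word.toList myTiles  -- myTiles.copy(): a fresh list with the same elements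

-- ===== PORT B =====
def canBeMade_alt (word : String) (myTiles : List String) : Bool :=
  let need := word.toList.foldl
    (fun d c => d.insert (String.mk [c]) (d.getD (String.mk [c]) 0 + 1))
    (PySem.Dict.empty : PySem.Dict String Int)
  let haveD := myTiles.foldl
    (fun d t => d.insert t (d.getD t 0 + 1))
    (PySem.Dict.empty : PySem.Dict String Int)
  need.items.all (fun p => decide (haveD.getD p.1 0 ≥ p.2))

-- ===== PRECONDITION & SPEC =====
def Spec_canBeMade (word : String) (myTiles : List String) (out : Bool) : Prop := out = canBeMade_alt word myTiles
instance (word : String) (myTiles : List String) (out : Bool) : Decidable (Spec_canBeMade word myTiles out) := by unfold Spec_canBeMade; infer_instance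

-- ===== CLAIM (what is proved, stated in full; the proofs are below) =====
def Claim_equal_canBeMade : Prop := ∀ (word : String) (myTiles : List String), Dom_canBeMade word myTiles → Spec_canBeMade word myTiles (canBeMade word myTiles)

-- ===== LEMMAS AND PROOFS =====

-- per-letter step: removing one copy of s0 from tiles shifts the count comparison by one
theorem erase_count_iff (s0 : String) (tiles : List String) (hmem : s0 ∈ tiles) (L : List String) :
    (∀ s : String, L.count s ≤ (tiles.erase s0).count s) ↔
      (∀ s : String, (s0 :: L).count s ≤ tiles.count s) := by
  have hc1 : 1 ≤ tiles.count s0 := List.one_le_count_iff.mpr hmem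
  constructor
  · intro h s
    have hh := h s
    by_cases hs : s = s0
    · subst hs
      rw [List.count_erase_self] at hh
      rw [List.count_cons_self]
      omega
    · rw [List.count_erase_of_ne hs] at hh
      rw [List.count_cons_of_ne (fun h => hs h.symm)]
      omega
  · intro h s
    have hh := h s
    by_cases hs : s = s0
    · subst hs
      rw [List.count_cons_self] at hh
      rw [List.count_erase_self]
      omega
    · rw [List.count_cons_of_ne (fun h => hs h.symm)] at hh
      rw [List.count_erase_of_ne hs]
      omega

-- A's loop succeeds iff every needed string occurs in the tiles at least as often as in the word
theorem canBeMadeLoop_iff (cs : List Char) :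
    ∀ tiles : List String,
      canBeMadeLoop cs tiles = true ↔
        ∀ s : String, (cs.map (fun c => String.mk [c])).count s ≤ tiles.count s := by
  induction cs with
  | nil => intro tiles; simp [canBeMadeLoop]
  | cons c rest ih =>
    intro tiles
    by_cases hmem : String.mk [c] ∈ tiles
    · rw [canBeMadeLoop, if_pos hmem, PySem.List.remove?_eq_some_erase tiles _ hmem, ih,
        erase_count_iff _ _ hmem, List.map_cons]
    · rw [canBeMadeLoop, if_neg hmem]
      simp only [Bool.false_eq_true, false_iff, not_forall, not_le]
      refine ⟨String.mk [c], ?_⟩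
      rw [List.count_eq_zero.mpr hmem, List.map_cons, List.count_cons_self]
      omega

-- B equals the same count comparison (via the counter characterisation of its fold)
theorem canBeMade_alt_iff (word : String) (myTiles : List String) :
    canBeMade_alt word myTiles = true ↔
      ∀ s : String, ((word.toList.map (fun c => String.mk [c])).count s ≤ myTiles.count s) := by
  unfold canBeMade_alt
  have hfold :
      word.toList.foldl
          (fun (d : PySem.Dict String Int) c =>
            d.insert (String.mk [c]) (d.getD (String.mk [c]) 0 + 1)) PySem.Dict.empty
        = PySem.Dict.counter (word.toList.map (fun c => String.mk [c])) := by
    rw [← PySem.Dict.foldl_insert_getD_add_one_eq_counter, List.foldl_map]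
  simp only [hfold, PySem.Dict.foldl_insert_getD_add_one_eq_counter, PySem.Dict.items_counter,
    List.all_map, Function.comp, List.all_eq_true, PySem.Dict.getD_counter, PySem.Set.mem_ofList,
    decide_eq_true_eq, ge_iff_le, Nat.cast_le]
  constructor
  · intro h s
    by_cases hs : s ∈ word.toList.map (fun c => String.mk [c])
    · exact h s hs
    · simp [List.count_eq_zero.mpr hs]
  · intro h s _
    exact h s

theorem canBeMade_spec : Claim_equal_canBeMade := by
  intro word myTiles _
  unfold Spec_canBeMade
  have ha := canBeMadeLoop_iff word.toList myTiles
  have hb := canBeMade_alt_iff word myTiles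
  unfold canBeMade
  rw [← hb] at ha
  cases h1 : canBeMadeLoop word.toList myTiles <;>
    cases h2 : canBeMade_alt word myTiles <;> simp_all
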